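-- pv_equiv track=rewrite | github.com/bitngu/Data-Structures-Algorithm | Python/Hash/hw4.py | nextMultPrime
-- ===== SOURCE A (Python) =====
-- def nextMultPrime(n):
--     n = n*2
--     for i in range(n, n*2):
--         for j in range(2,i):
--             #prime only can multiple itself or 1 and since we start at 2 it
--             #only reach to the "end"
--             if i % j == 0:
--                 break
--         else:
--             return i
-- ===== SOURCE B (Python) =====
-- def _is_prime(i):
--     if i < 2:
--         return False
--     j = 2
--     while j * j <= i:
--         if i % j == 0:
--             return False
--         j += 1
--     return True
--
--
-- def nextMultPrime(n):
--     m = 2 * n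
--     for i in range(m, 2 * m):
--         if _is_prime(i):
--             return i
-- ===== Notes on version B (the rewrite author's own statement) =====
-- stated objective: faster
-- what changed: The inner primality test scans all divisors up to i and breaks at the first; B instead tests divisors only up to sqrt(i) (while j*j <= i), so the successful prime candidate costs O(sqrt(p)) instead of O(p).
import Mathlib
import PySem

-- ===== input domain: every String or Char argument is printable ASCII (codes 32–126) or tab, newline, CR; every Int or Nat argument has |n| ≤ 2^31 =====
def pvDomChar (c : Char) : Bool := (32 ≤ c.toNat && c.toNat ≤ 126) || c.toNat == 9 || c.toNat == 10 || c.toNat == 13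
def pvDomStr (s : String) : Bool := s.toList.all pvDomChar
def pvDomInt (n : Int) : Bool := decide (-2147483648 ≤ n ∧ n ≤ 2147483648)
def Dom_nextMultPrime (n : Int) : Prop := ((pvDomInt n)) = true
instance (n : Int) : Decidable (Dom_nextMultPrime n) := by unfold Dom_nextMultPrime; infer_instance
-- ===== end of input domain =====

-- B replaces A's full trial-division scan over range(2, i) by a divisor test bounded by j*j <= i (objective: faster).

-- ===== PORT A =====
-- inner loop 'for j in range(2, i): if i % j == 0: break / else: return i';
-- result true = the else branch is reached (no break)
def pvInnerA (i : Int) : List Int → Bool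
  | [] => true
  | j :: rest => if PySem.Int.mod i j = 0 then false else pvInnerA i rest

-- outer loop 'for i in range(n, n*2)': return the first i whose inner loop falls through
def pvOuterA : List Int → Option Int
  | [] => none
  | i :: rest => if pvInnerA i (PySem.List.pyRange 2 i 1) then some i else pvOuterA rest

def nextMultPrime (n : Int) : Option Int :=
  let n2 := n * 2
  pvOuterA (PySem.List.pyRange n2 (n2 * 2) 1)

-- ===== PORT B =====
-- 'while j * j <= i: if i % j == 0: return False; j += 1' then 'return True'
def pvTdLoop (i j : Int) : Bool :=
  if _h : j * j ≤ i then
    (if PySem.Int.mod i j = 0 then false else pvTdLoop i (j + 1))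
  else true
termination_by (i + 1 - j).toNat
decreasing_by
  have hj : j ≤ i := by
    rcases (show j ≤ 0 ∨ 0 < j by omega) with h0 | h0
    · nlinarith [mul_self_nonneg j]
    · nlinarith
  omega

def pvIsPrime (i : Int) : Bool := if i < 2 then false else pvTdLoop i 2

def pvOuterB : List Int → Option Int
  | [] => none
  | i :: rest => if pvIsPrime i then some i else pvOuterB rest

def nextMultPrime_alt (n : Int) : Option Int :=
  let m := 2 * n
  pvOuterB (PySem.List.pyRange m (2 * m) 1)

-- ===== PRECONDITION & SPEC =====
def Spec_nextMultPrime (n : Int) (out : Option Int) : Prop := out = nextMultPrime_alt n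
instance (n : Int) (out : Option Int) : Decidable (Spec_nextMultPrime n out) := by unfold Spec_nextMultPrime; infer_instance

-- ===== CLAIM (what is proved, stated in full; the proofs are below) =====
def Claim_equal_nextMultPrime : Prop := ∀ (n : Int), Dom_nextMultPrime n → Spec_nextMultPrime n (nextMultPrime n)

-- ===== LEMMAS AND PROOFS =====

lemma pvInnerA_iff (i : Int) (l : List Int) :
    pvInnerA i l = true ↔ ∀ j ∈ l, ¬ j ∣ i := by
  induction l with
  | nil => simp [pvInnerA]
  | cons j rest ih =>
    by_cases h : j ∣ i
    · have hm : PySem.Int.mod i j = 0 := (PySem.Int.mod_eq_zero_iff_dvd i j).mpr h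
      simp [pvInnerA, hm, h]
    · have hm : PySem.Int.mod i j ≠ 0 := fun hc => h ((PySem.Int.mod_eq_zero_iff_dvd i j).mp hc)
      simp [pvInnerA, hm, h, ih]

lemma pvTdLoop_iff (i : Int) (j : Int) (hj : 0 ≤ j) :
    pvTdLoop i j = true ↔ ∀ k, j ≤ k → k * k ≤ i → ¬ k ∣ i := by
  fun_induction pvTdLoop i j with
  | case1 j hle hm =>
    -- mod = 0 here: result false, RHS refuted by k = j
    have hd : j ∣ i := (PySem.Int.mod_eq_zero_iff_dvd i j).mp hm
    simp only [Bool.false_eq_true, false_iff]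
    intro h
    exact h j le_rfl hle hd
  | case2 j hle hm ih =>
    have hd : ¬ j ∣ i := fun hc => hm ((PySem.Int.mod_eq_zero_iff_dvd i j).mpr hc)
    rw [ih (by omega)]
    constructor
    · intro h k hk hksq hkdvd
      rcases eq_or_lt_of_le hk with rfl | hlt
      · exact hd hkdvd
      · exact h k (by omega) hksq hkdvd
    · intro h k hk hksq hkdvd
      exact h k (by omega) hksq hkdvd
  | case3 j hle =>
    simp only [true_iff]
    intro k hk hksq
    exfalso
    have : j * j ≤ k * k := by nlinarith
    omega

lemma pvCheck_iff (i : Int) (hi : 2 ≤ i) :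
    (∀ j, 2 ≤ j → j < i → ¬ j ∣ i) ↔ (∀ j, 2 ≤ j → j * j ≤ i → ¬ j ∣ i) := by
  constructor
  · intro h j h2 hsq
    exact h j h2 (by nlinarith)
  · intro h j h2 hlt hdvd
    obtain ⟨d, hd⟩ := hdvd
    have hdpos : 0 < d := by nlinarith
    have hd2 : 2 ≤ d := by nlinarith
    rcases (show j * j ≤ i ∨ i < j * j by omega) with hc | hc
    · exact h j h2 hc ⟨d, hd⟩
    · have hdj : d < j := by nlinarith
      exact h d hd2 (by nlinarith) ⟨j, by rw [hd]; ring⟩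

lemma pvPointwise (i : Int) (hi : 2 ≤ i) :
    pvInnerA i (PySem.List.pyRange 2 i 1) = pvIsPrime i := by
  have hA : pvInnerA i (PySem.List.pyRange 2 i 1) = true ↔ ∀ j, 2 ≤ j → j < i → ¬ j ∣ i := by
    rw [pvInnerA_iff]
    constructor
    · intro h j h2 hlt
      exact h j (by rw [PySem.List.mem_pyRange_one]; omega)
    · intro h j hj
      rw [PySem.List.mem_pyRange_one] at hj
      exact h j hj.1 hj.2
  have hB : pvIsPrime i = true ↔ ∀ j, 2 ≤ j → j * j ≤ i → ¬ j ∣ i := by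
    unfold pvIsPrime
    rw [if_neg (by omega)]
    rw [pvTdLoop_iff i 2 (by omega)]
  rw [Bool.eq_iff_iff, hA, hB]
  exact pvCheck_iff i hi

lemma pvOuter_congr (l : List Int)
    (h : ∀ i ∈ l, pvInnerA i (PySem.List.pyRange 2 i 1) = pvIsPrime i) :
    pvOuterA l = pvOuterB l := by
  induction l with
  | nil => rfl
  | cons i rest ih =>
    have hi := h i (List.mem_cons_self ..)
    simp only [pvOuterA, pvOuterB, hi]
    split
    · rfl
    · exact ih fun x hx => h x (List.mem_cons_of_mem _ hx)

-- ===== VERDICT (by name: the statement is the Claim_ definition above) =====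
theorem nextMultPrime_spec : Claim_equal_nextMultPrime := by
  intro n _
  unfold Spec_nextMultPrime nextMultPrime nextMultPrime_alt
  simp only []
  have hrange : PySem.List.pyRange (n * 2) (n * 2 * 2) 1 = PySem.List.pyRange (2 * n) (2 * (2 * n)) 1 := by
    ring_nf
  rw [hrange]
  apply pvOuter_congr
  intro i hi
  rw [PySem.List.mem_pyRange_one] at hi
  exact pvPointwise i (by omega)
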